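-- pv_equiv track=rewrite | github.com/wkral/scrwall.com | src/walls.py | get_string_id
-- ===== SOURCE A (Python) =====
-- def get_string_id(n, alphabet):
--     if (n == 0):
--         return alphabet[0]
--     arr = []
--     base = len(alphabet)
--     while n:
--         rem = n % base
--         n = n // base
--         arr.append(alphabet[rem])
--     if len(arr) < 3:
--         for i in range(3 - len(arr)):
--             arr.append(alphabet[0])
--     arr.reverse()
--     return ''.join(arr)
-- ===== SOURCE B (Python) =====
-- def get_string_id(n, alphabet):
--     if n == 0:
--         return alphabet[0]
--     base = len(alphabet)
--     length = 3
--     while base ** length <= n: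
--         length += 1
--     return ''.join(alphabet[(n // base ** i) % base] for i in range(length - 1, -1, -1))
-- ===== Notes on version B (the rewrite author's own statement) =====
-- stated objective: simpler
-- what changed: B precomputes the output length (max of 3 and the digit count via a base**length comparison loop) and emits digits most-significant-first by power-indexed division, replacing A's append-remainders-then-pad-then-reverse construction.
import Mathlib
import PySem

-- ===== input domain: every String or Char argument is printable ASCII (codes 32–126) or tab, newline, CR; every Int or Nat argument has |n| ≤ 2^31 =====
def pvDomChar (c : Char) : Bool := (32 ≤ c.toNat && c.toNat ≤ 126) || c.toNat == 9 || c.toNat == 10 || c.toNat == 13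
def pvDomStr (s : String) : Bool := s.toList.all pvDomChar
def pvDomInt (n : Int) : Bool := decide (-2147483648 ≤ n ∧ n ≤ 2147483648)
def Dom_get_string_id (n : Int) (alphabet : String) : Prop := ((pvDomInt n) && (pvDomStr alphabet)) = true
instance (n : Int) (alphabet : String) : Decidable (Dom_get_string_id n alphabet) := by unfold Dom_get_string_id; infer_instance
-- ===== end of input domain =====

-- B replaces A's append-remainders-then-reverse-and-pad loop by computing the output
-- length first (max of 3 and the digit count) and filling positions most-significant-first;
-- objective: simpler (no reversal, no separate padding pass).

-- ===== PORT A =====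
-- the 'while n:' loop; fuel n.toNat + 1 suffices on Pre_ (n strictly decreases there);
-- alphabet[rem] via pyGetD: rem is always in range when 0 < base, which Pre_ guarantees
def pvA_loop (cs : List Char) (base : Int) : Nat → Int → List Char → List Char
  | 0, _, arr => arr
  | fuel + 1, n, arr =>
    if n ≠ 0 then
      let rem := PySem.Int.mod n base
      let n' := PySem.Int.floordiv n base
      pvA_loop cs base fuel n' (arr ++ [PySem.List.pyGetD cs rem ' '])
    else arr

def get_string_id (n : Int) (alphabet : String) : String :=
  if n = 0 then String.ofList [PySem.List.pyGetD alphabet.toList 0 ' ']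
  else
    let base : Int := (alphabet.toList.length : Int)
    let arr := pvA_loop alphabet.toList base (n.toNat + 1) n []
    let arr :=
      if arr.length < 3 then
        (PySem.List.pyRange 0 ((3 : Int) - arr.length) 1).foldl
          (fun a _ => a ++ [PySem.List.pyGetD alphabet.toList 0 ' ']) arr
      else arr
    String.ofList arr.reverse

-- ===== PORT B =====
-- the 'while base ** length <= n:' loop; fuel 64 suffices on Dom ∩ Pre_ (base ≥ 2, n ≤ 2^31,
-- so base^length > n before length reaches 3 + 64); the exponent is nonnegative throughout
def pvB_len (base n : Int) : Nat → Int → Int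
  | 0, length => length
  | fuel + 1, length =>
    if base ^ length.toNat ≤ n then pvB_len base n fuel (length + 1) else length

def get_string_id_alt (n : Int) (alphabet : String) : String :=
  if n = 0 then String.ofList [PySem.List.pyGetD alphabet.toList 0 ' ']
  else
    let base : Int := (alphabet.toList.length : Int)
    let length := pvB_len base n 64 3
    String.ofList ((PySem.List.pyRange (length - 1) (-1) (-1)).map
      (fun i => PySem.List.pyGetD alphabet.toList
        (PySem.Int.mod (PySem.Int.floordiv n (base ^ i.toNat)) base) ' '))

-- ===== PRECONDITION & SPEC =====
-- Pre_ excludes exactly the inputs where A does not return: n < 0 or (n ≠ 0 with a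
-- one-letter alphabet) make the while loop diverge; an empty alphabet raises
-- (IndexError at alphabet[0] for n = 0, ZeroDivisionError at n % 0 otherwise).
def Pre_get_string_id (n : Int) (alphabet : String) : Prop :=
  (n = 0 ∧ 1 ≤ alphabet.toList.length) ∨ (1 ≤ n ∧ 2 ≤ alphabet.toList.length)
instance (n : Int) (alphabet : String) : Decidable (Pre_get_string_id n alphabet) := by
  unfold Pre_get_string_id; infer_instance

def pvWitness_get_string_id : Int × String := (5, "ab")

def Spec_get_string_id (n : Int) (alphabet : String) (out : String) : Prop := out = get_string_id_alt n alphabet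
instance (n : Int) (alphabet : String) (out : String) : Decidable (Spec_get_string_id n alphabet out) := by unfold Spec_get_string_id; infer_instance

-- ===== CLAIM (what is proved, stated in full; the proofs are below) =====
def Claim_equal_get_string_id : Prop := ∀ (n : Int) (alphabet : String), Dom_get_string_id n alphabet → Pre_get_string_id n alphabet → Spec_get_string_id n alphabet (get_string_id n alphabet)

-- ===== LEMMAS AND PROOFS =====

-- A's loop collects exactly the base-b digits of m, least significant first
theorem pvA_loop_eq (cs : List Char) (b : Nat) (hb : 2 ≤ b) :
    ∀ (fuel m : Nat) (acc : List Char), m ≤ fuel →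
      pvA_loop cs (b : Int) fuel (m : Int) acc =
        acc ++ (Nat.digits b m).map (fun d => cs.getD d ' ') := by
  intro fuel
  induction fuel with
  | zero => intro m acc h; interval_cases m; simp [pvA_loop]
  | succ f ih =>
    intro m acc h
    rcases Nat.eq_zero_or_pos m with hm | hm
    · subst hm; simp [pvA_loop]
    · have hmne : (m : Int) ≠ 0 := by exact_mod_cast hm.ne'
      rw [pvA_loop, if_pos hmne]
      simp only [PySem.Int.mod_natCast, PySem.Int.floordiv_natCast,
        PySem.List.pyGetD_natCast]
      rw [ih (m / b) _ (by
        have : m / b < m := Nat.div_lt_self hm (by omega)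
        omega)]
      rw [Nat.digits_def' (by omega : 1 < b) hm]
      simp [List.getD]

-- B's length loop returns max(start, log_b m + 1) once the fuel is sufficient
theorem pvB_len_eq (b m : Nat) (hb : 2 ≤ b) (hm : 0 < m) :
    ∀ (fuel L : Nat), m < b ^ (L + fuel) →
      pvB_len (b : Int) (m : Int) fuel (L : Int) =
        ((max L (Nat.log b m + 1) : Nat) : Int) := by
  intro fuel
  induction fuel with
  | zero =>
    intro L h
    have : Nat.log b m < L := (Nat.log_lt_iff_lt_pow (by omega) hm.ne').mpr (by simpa using h)
    rw [pvB_len]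
    congr 1
    omega
  | succ f ih =>
    intro L h
    rw [pvB_len]
    have htn : ((L : Int)).toNat = L := Int.toNat_natCast L
    by_cases hle : b ^ L ≤ m
    · have hc : ((b : Int) ^ ((L : Int)).toNat ≤ (m : Int)) := by
        rw [htn]; exact_mod_cast hle
      rw [if_pos hc]
      have hLlog : L ≤ Nat.log b m := (Nat.le_log_iff_pow_le (by omega) hm.ne').mpr hle
      have hcast : ((L : Int) + 1) = ((L + 1 : Nat) : Int) := by push_cast; ring
      rw [hcast, ih (L + 1) (by
        have he : L + (f + 1) = (L + 1) + f := by ring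
        rw [← he]; exact h)]
      congr 1
      omega
    · have hc : ¬ ((b : Int) ^ ((L : Int)).toNat ≤ (m : Int)) := by
        rw [htn]; exact_mod_cast hle
      rw [if_neg hc]
      have : Nat.log b m < L := (Nat.log_lt_iff_lt_pow (by omega) hm.ne').mpr (by omega)
      congr 1
      omega

-- the i-th base-b digit of m is m / b^i % b
theorem digits_getD (b : Nat) (hb : 2 ≤ b) :
    ∀ (m i : Nat), (Nat.digits b m).getD i 0 = m / b ^ i % b := by
  intro m
  induction m using Nat.strong_induction_on with
  | _ m ih =>
    intro i
    rcases Nat.eq_zero_or_pos m with hm | hm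
    · subst hm; simp [Nat.zero_div, Nat.zero_mod]
    · rw [Nat.digits_def' (by omega : 1 < b) hm]
      cases i with
      | zero => simp
      | succ i =>
        have hlt : m / b < m := Nat.div_lt_self hm (by omega)
        simp only [List.getD_cons_succ]
        rw [ih (m / b) hlt i, Nat.div_div_eq_div_mul, pow_succ']

-- padding with a foldl over a range appends length-many copies
theorem foldl_append_const {α : Type} (c : α) :
    ∀ (r : List Int) (acc : List α),
      r.foldl (fun a _ => a ++ [c]) acc = acc ++ List.replicate r.length c := by
  intro r
  induction r with
  | nil => simp
  | cons x xs ih =>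
    intro acc
    rw [List.foldl_cons, ih]
    simp [List.replicate_succ, List.append_assoc]

-- the ascending digit-character list up to any L ≥ digit count
theorem asc_eq (cs : List Char) (b m L : Nat) (hb : 2 ≤ b) (hm : 0 < m)
    (hL : (Nat.digits b m).length ≤ L) :
    (List.range L).map (fun i => cs.getD (m / b ^ i % b) ' ') =
      (Nat.digits b m).map (fun d => cs.getD d ' ') ++
        List.replicate (L - (Nat.digits b m).length) (cs.getD 0 ' ') := by
  set dl := (Nat.digits b m).length with hdl
  apply List.ext_getElem
  · simp; omega
  · intro i h1 h2
    simp only [List.getElem_map, List.getElem_range]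
    rcases lt_or_ge i dl with hi | hi
    · rw [List.getElem_append_left (by simpa using hi)]
      simp only [List.getElem_map]
      have := digits_getD b hb m i
      rw [List.getD_eq_getElem _ _ (by omega)] at this
      rw [← this]
    · rw [List.getElem_append_right (by simpa using hi)]
      simp only [List.getElem_replicate]
      have hmlt : m < b ^ i := by
        have h1 : m < b ^ dl := Nat.lt_base_pow_length_digits (by omega)
        exact lt_of_lt_of_le h1 (Nat.pow_le_pow_right (by omega) hi)
      rw [Nat.div_eq_of_lt hmlt]
      simp

-- index-reversed map over a range is the reverse of the ascending map
theorem map_range_rev {α : Type} (f : Nat → α) (L : Nat) :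
    (List.range L).map (fun k => f (L - 1 - k)) = ((List.range L).map f).reverse := by
  apply List.ext_getElem
  · simp
  · intro i h1 h2
    simp only [List.getElem_map, List.getElem_range, List.getElem_reverse,
      List.length_map, List.length_range]

-- ===== VERDICT (by name: the statement is the Claim_ definition above) =====
theorem get_string_id_spec : Claim_equal_get_string_id := by
  intro n alphabet hdom hpre
  unfold Spec_get_string_id
  rcases hpre with ⟨hn0, _⟩ | ⟨hn1, hb2⟩
  · subst hn0; rfl
  · -- n ≥ 1, alphabet has ≥ 2 characters
    set cs := alphabet.toList with hcs
    set b := cs.length with hbdef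
    have hb : 2 ≤ b := hb2
    have hnne : n ≠ 0 := by omega
    set m := n.toNat with hm
    have hmn : (m : Int) = n := Int.toNat_of_nonneg (by omega)
    have hm1 : 0 < m := by omega
    have hbound : n ≤ 2147483648 := by
      have := hdom
      unfold Dom_get_string_id pvDomInt at this
      simp only [Bool.and_eq_true, decide_eq_true_eq] at this
      exact this.1.2
    set dl := (Nat.digits b m).length with hdl
    have hdl_eq : dl = Nat.log b m + 1 := Nat.length_digits b m (by omega) hm1.ne'
    set L := max 3 (Nat.log b m + 1) with hL
    -- evaluate port A
    have hA : get_string_id n alphabet =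
        String.ofList (((Nat.digits b m).map (fun d => cs.getD d ' ') ++
          List.replicate (3 - dl) (cs.getD 0 ' ')).reverse) := by
      unfold get_string_id
      rw [if_neg hnne]
      simp only [← hcs]
      rw [← hmn]
      simp only [Int.toNat_natCast, ← hbdef]
      rw [pvA_loop_eq cs b hb (m + 1) m [] (by omega), List.nil_append]
      have hlen : ((Nat.digits b m).map (fun d => cs.getD d ' ')).length = dl := by
        simp [hdl]
      by_cases h3 : dl < 3
      · rw [if_pos (by rw [hlen]; exact h3)]
        rw [foldl_append_const]
        have hcount : ((3 : Int) - (dl : Int) - 0).toNat = 3 - dl := by omega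
        simp only [PySem.List.length_pyRange_one, PySem.List.pyGetD_zero, hlen, hcount]
      · rw [if_neg (by rw [hlen]; omega)]
        have : 3 - dl = 0 := by omega
        rw [this, List.replicate_zero, List.append_nil]
    -- evaluate port B
    have hB : get_string_id_alt n alphabet =
        String.ofList (((Nat.digits b m).map (fun d => cs.getD d ' ') ++
          List.replicate (3 - dl) (cs.getD 0 ' ')).reverse) := by
      unfold get_string_id_alt
      rw [if_neg hnne]
      simp only [← hcs]
      simp only [← hbdef]
      have h3c : (3 : Int) = ((3 : Nat) : Int) := by norm_num
      have hfuel : m < b ^ (3 + 64) := by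
        calc m ≤ 2 ^ 31 := by omega
        _ < 2 ^ 67 := by norm_num
        _ ≤ b ^ 67 := Nat.pow_le_pow_left (by omega) 67
      rw [← hmn, h3c, pvB_len_eq b m hb hm1 64 3 hfuel]
      rw [PySem.List.pyRange_neg_one]
      have hLcast : ((max 3 (Nat.log b m + 1) : Nat) : Int) - 1 - (-1) = (L : Int) := by
        rw [hL]; push_cast; ring
      rw [hLcast]
      rw [Int.toNat_natCast]
      rw [List.map_map]
      have hfun : ∀ k ∈ List.range L,
          ((fun i => PySem.List.pyGetD cs
              (PySem.Int.mod (PySem.Int.floordiv (m : Int) ((cs.length : Int) ^ i.toNat)) (cs.length : Int)) ' ') ∘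
            (fun k : Nat => ((max 3 (Nat.log b m + 1) : Nat) : Int) - 1 - (k : Int))) k =
          (fun k => cs.getD (m / b ^ (L - 1 - k) % b) ' ') k := by
        intro k hk
        simp only [List.mem_range] at hk
        simp only [Function.comp_apply]
        have hidx : (((max 3 (Nat.log b m + 1) : Nat) : Int) - 1 - (k : Int)).toNat = L - 1 - k := by
          rw [← hL]; omega
        rw [hidx]
        have hpow : ((cs.length : Int)) ^ (L - 1 - k) = ((b ^ (L - 1 - k) : Nat) : Int) := by
          rw [← hbdef]; push_cast; ring
        rw [hpow, ← hbdef, PySem.Int.floordiv_natCast, PySem.Int.mod_natCast,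
          PySem.List.pyGetD_natCast]
      rw [List.map_congr_left hfun]
      rw [map_range_rev (fun i => cs.getD (m / b ^ i % b) ' ') L]
      rw [asc_eq cs b m L hb hm1 (by omega)]
      have : L - dl = 3 - dl := by omega
      rw [this]
    rw [hA, hB]

-- ===== TEMPLATES kept out; end of file =====
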